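-- pv_equiv track=rewrite | github.com/MarcosVRRibeiro/MAC0115-Introducao-a-computacao | EP6-v8.py | soma_mediana
-- ===== SOURCE A (Python) =====
-- def cria_matriz(nlinhas, ncolunas, valor):
--
--     ''' (int, int, tipo do valor) --> matriz (ou seja, tipo list)
--     Cria uma matriz com nlinhas linhas e ncolunas colunas,
--     sendo que cada elemento é igual a valor.
--     Retorna a matriz criada.
--     '''
--
--     matriz = []
--     for i in range(0, nlinhas, 1):
--
--         linha = []
--         for j in range(0, ncolunas, 1):
--             linha.append(valor)
--
--         matriz.append(linha)
--
--     return matriz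
--
-- def soma_mediana(a):
--     """ (matriz) --> matriz
--     Recebe uma matriz de inteiros a.
--     A função constrói a matriz b resultante da aplicação da
--     transformação correspondente em a e retorna a matriz b.
--     """
--     nlinA = len(a)
--     ncolA = len(a[0])
--     nlinB = nlinA+2
--     ncolB = ncolA+2
--     valor = 0
--     b = cria_matriz(nlinB, ncolB, valor)
--
--     for i in range (0, nlinA, 1):
--         for j in range (0, ncolA, 1):
--             b[i+1][j+1] = a[i][j] + 6
--
--     for w in range (0, ncolB, 1):
--         b[0][w]=6
--
--     for w in range (0, ncolB, 1):
--         b[nlinB-1][w]=6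
--
--     for w in range (0, nlinB, 1):
--         b[w][0] = 6
--
--     for w in range (0, nlinB, 1):
--         b[w][ncolB-1] = 6
--
--     return b
-- ===== SOURCE B (Python) =====
-- def soma_mediana(a):
--     """ (matriz) --> matriz
--     Computes every cell of the bordered matrix by one closed-form rule over
--     the full (n+2) x (m+2) index grid: interior cells are a[i-1][j-1]+6,
--     everything else is 0+6 = 6.
--     """
--     n = len(a)
--     m = len(a[0])
--     return [[(a[i - 1][j - 1] if 0 < i <= n and 0 < j <= m else 0) + 6
--              for j in range(m + 2)]
--             for i in range(n + 2)]
-- ===== Notes on version B (the rewrite author's own statement) =====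
-- stated objective: simpler
-- what changed: B computes each cell of the (n+2)x(m+2) result by a single closed-form index rule (interior -> a[i-1][j-1]+6, border -> 6) over the full index grid, instead of A's zero pre-allocation patched by one interior loop and four separate border-filling loops.
import Mathlib
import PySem

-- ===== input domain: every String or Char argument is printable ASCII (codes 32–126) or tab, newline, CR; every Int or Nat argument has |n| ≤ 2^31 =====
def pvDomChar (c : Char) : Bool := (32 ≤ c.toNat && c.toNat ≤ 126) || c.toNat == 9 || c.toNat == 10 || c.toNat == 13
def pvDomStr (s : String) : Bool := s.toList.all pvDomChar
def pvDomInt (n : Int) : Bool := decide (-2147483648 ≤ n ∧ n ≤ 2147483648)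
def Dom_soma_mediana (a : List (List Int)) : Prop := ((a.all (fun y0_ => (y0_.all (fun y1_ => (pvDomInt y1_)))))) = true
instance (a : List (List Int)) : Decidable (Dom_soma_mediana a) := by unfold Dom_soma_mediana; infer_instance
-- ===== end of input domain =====

-- B computes every cell of the result by one closed-form index rule over the full
-- (n+2)×(m+2) grid instead of A's zero pre-allocation patched by five fill loops
-- (objective: simpler).

-- ===== PORT A =====
-- cria_matriz: nested append loops building an nlinhas × ncolunas matrix of `valor`
def criaMatriz (nlinhas ncolunas valor : Int) : List (List Int) :=
  (PySem.List.pyRange 0 nlinhas 1).foldl (fun matriz _i =>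
    matriz ++ [(PySem.List.pyRange 0 ncolunas 1).foldl (fun linha _j => linha ++ [valor]) []]) []

-- b[i][j] = v  (all indices A writes are nonnegative and in range)
def setCell (b : List (List Int)) (i j : Nat) (v : Int) : List (List Int) :=
  b.set i ((b.getD i []).set j v)

def soma_mediana (a : List (List Int)) : List (List Int) :=
  let nlinA : Int := a.length
  -- len(a[0]); a = [] raises IndexError in Python, excluded by Pre_
  let ncolA : Int := (((PySem.List.pyGet? a 0).getD []).length : Int)
  let nlinB : Int := nlinA + 2
  let ncolB : Int := ncolA + 2
  let b0 := criaMatriz nlinB ncolB 0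
  let b1 := (PySem.List.pyRange 0 nlinA 1).foldl (fun b i =>
      (PySem.List.pyRange 0 ncolA 1).foldl (fun b j =>
        setCell b (i+1).toNat (j+1).toNat
          (PySem.List.pyGetD (PySem.List.pyGetD a i []) j 0 + 6)) b) b0
  let b2 := (PySem.List.pyRange 0 ncolB 1).foldl (fun b w => setCell b 0 w.toNat 6) b1
  let b3 := (PySem.List.pyRange 0 ncolB 1).foldl (fun b w => setCell b (nlinB-1).toNat w.toNat 6) b2
  let b4 := (PySem.List.pyRange 0 nlinB 1).foldl (fun b w => setCell b w.toNat 0 6) b3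
  let b5 := (PySem.List.pyRange 0 nlinB 1).foldl (fun b w => setCell b w.toNat (ncolB-1).toNat 6) b4
  b5

-- ===== PORT B =====
def soma_mediana_alt (a : List (List Int)) : List (List Int) :=
  let n : Int := a.length
  -- len(a[0]); a = [] raises IndexError in Python, excluded by Pre_
  let m : Int := (((PySem.List.pyGet? a 0).getD []).length : Int)
  (PySem.List.pyRange 0 (n+2) 1).map (fun i =>
    (PySem.List.pyRange 0 (m+2) 1).map (fun j =>
      (if 0 < i ∧ i ≤ n ∧ 0 < j ∧ j ≤ m
       then PySem.List.pyGetD (PySem.List.pyGetD a (i-1) []) (j-1) 0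
       else 0) + 6))

-- ===== PRECONDITION & SPEC =====
-- Pre_ excludes exactly the inputs where the Python raises IndexError: the empty
-- matrix (a[0]) and matrices with some row shorter than the first row (a[i][j], j < len(a[0])).
def Pre_soma_mediana (a : List (List Int)) : Prop :=
  a ≠ [] ∧ ∀ r ∈ a, (a.headD []).length ≤ r.length
instance (a : List (List Int)) : Decidable (Pre_soma_mediana a) := by unfold Pre_soma_mediana; infer_instance

def pvWitness_soma_mediana : List (List Int) := [[1, 2], [3, 4]]

def Spec_soma_mediana (a : List (List Int)) (out : List (List Int)) : Prop := out = soma_mediana_alt a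
instance (a : List (List Int)) (out : List (List Int)) : Decidable (Spec_soma_mediana a out) := by unfold Spec_soma_mediana; infer_instance

-- ===== CLAIM (what is proved, stated in full; the proofs are below) =====
def Claim_equal_soma_mediana : Prop := ∀ (a : List (List Int)), Dom_soma_mediana a → Pre_soma_mediana a → Spec_soma_mediana a (soma_mediana a)

-- ===== LEMMAS AND PROOFS =====

-- the common target both ports are reduced to: border row, wrapped rows, border row
def pvCanon (a : List (List Int)) : List (List Int) :=
  let m : Nat := ((PySem.List.pyGet? a 0).getD []).length
  List.replicate (m+2) (6:Int) ::
    a.map (fun row => 6 :: (List.range m).map (fun j => row.getD j 0 + 6) ++ [6]) ++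
    [List.replicate (m+2) (6:Int)]

-- the append-`valor` loop of cria_matriz builds a replicate
theorem pv_foldl_append_const {α β : Type} (v : α) (l : List β) (init : List α) :
    l.foldl (fun acc _ => acc ++ [v]) init = init ++ List.replicate l.length v := by
  induction l generalizing init with
  | nil => simp
  | cons x xs ih =>
    simp only [List.foldl_cons, ih, List.length_cons]
    rw [List.replicate_succ, List.append_assoc]
    rfl

theorem pv_criaMatriz (n m : Nat) (v : Int) :
    criaMatriz (n : Int) (m : Int) v = List.replicate n (List.replicate m v) := by
  simp only [criaMatriz, PySem.List.pyRange_zero_nat, List.foldl_map, pv_foldl_append_const]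
  simp

-- a fold that rewrites one row at a time, at indices s, s+1, …, s+k-1, each row's
-- new value a function of the index and the old row
theorem pv_foldl_set_seq {α : Type} (d : α) (f : Nat → α → α) (s : Nat) :
    ∀ (k : Nat) (b : List α), s + k ≤ b.length →
      (List.range k).foldl (fun b w => b.set (s + w) (f w (b.getD (s + w) d))) b
        = b.take s ++ (List.range k).map (fun w => f w (b.getD (s + w) d)) ++ b.drop (s + k) := by
  intro k
  induction k with
  | zero => intro b h; simp
  | succ k ih =>
    intro b h
    rw [List.range_succ, List.foldl_append, ih b (by omega)]
    simp only [List.foldl_cons, List.foldl_nil, List.map_append, List.map_cons, List.map_nil]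
    have hsk : s + k < b.length := by omega
    have hget : (b.take s ++ (List.range k).map (fun w => f w (b.getD (s + w) d)) ++ b.drop (s + k)).getD (s + k) d
        = b.getD (s + k) d := by
      rw [List.getD_eq_getElem?_getD, List.getD_eq_getElem?_getD]
      rw [List.append_assoc, List.getElem?_append_right (by simp)]
      rw [List.getElem?_append_right (by simp; omega)]
      have he : s + k - (List.take s b).length - (List.map (fun w => f w (b.getD (s + w) d)) (List.range k)).length = 0 := by
        simp; omega
      rw [he, List.getElem?_drop]
      simp
    rw [hget]
    have hdrop : b.drop (s + k) = b[s+k] :: b.drop (s + k + 1) := List.drop_eq_getElem_cons hsk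
    rw [List.append_assoc, List.set_append_right _ _ (by simp)]
    rw [List.set_append_right _ _ (by simp; omega)]
    have h1 : s + k - (List.take s b).length - (List.map (fun w => f w (b.getD (s + w) d)) (List.range k)).length = 0 := by
      simp; omega
    rw [h1, hdrop]
    simp [List.getD_eq_getElem?_getD, List.getElem?_eq_getElem hsk, List.append_assoc]
    rw [hdrop]
    rfl

-- set i (getD i) is the identity
theorem pv_set_getD_self {α : Type} {b : List α} {i : Nat} {d : α} (h : i < b.length) :
    b.set i (b.getD i d) = b := by
  rw [List.getD_eq_getElem _ _ h, List.set_getElem_self]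

-- same-row composition: repeated writes into one fixed row collapse to a single set
theorem pv_foldl_same_row {β : Type} (step : List Int → β → List Int) (i : Nat) :
    ∀ (ws : List β) (b : List (List Int)), i < b.length →
      ws.foldl (fun b w => b.set i (step (b.getD i []) w)) b
        = b.set i (ws.foldl step (b.getD i [])) := by
  intro ws
  induction ws with
  | nil => intro b h; exact (pv_set_getD_self h).symm
  | cons w ws ih =>
    intro b h
    simp only [List.foldl_cons]
    rw [ih _ (by simpa using h), List.set_set]
    congr 1
    rw [List.getD_eq_getElem _ _ (by simpa using h)]
    simp

-- fold congruence under a state invariant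
theorem pv_foldl_congr_inv {α β : Type} (P : α → Prop) (g h : α → β → α) (l : List β) :
    ∀ (b : α), P b → (∀ a x, P a → x ∈ l → P (h a x)) → (∀ a x, P a → x ∈ l → g a x = h a x) →
      l.foldl g b = l.foldl h b := by
  induction l with
  | nil => intros; rfl
  | cons x xs ih =>
    intro b hb hP heq
    simp only [List.foldl_cons]
    rw [heq b x hb (by simp)]
    exact ih _ (hP b x hb (by simp)) (fun a y ha hy => hP a y ha (by simp [hy]))
      (fun a y ha hy => heq a y ha (by simp [hy]))

-- mapping a function of the elements over range = mapping over the list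
theorem pv_map_range_getD {α β : Type} (l : List α) (d : α) (g : α → β) :
    (List.range l.length).map (fun w => g (l.getD w d)) = l.map g := by
  apply List.ext_getElem (by simp)
  intro i h1 h2
  simp only [List.getElem_map, List.getElem_range]
  rw [List.getD_eq_getElem _ _ (by simpa using h2)]

theorem pv_foldl_set_seq1 {α : Type} (d : α) (f : Nat → α → α) (k : Nat) (b : List α)
    (h : k + 1 ≤ b.length) :
    (List.range k).foldl (fun b w => b.set (w+1) (f w (b.getD (w+1) d))) b
      = b.take 1 ++ (List.range k).map (fun w => f w (b.getD (w+1) d)) ++ b.drop (k+1) := by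
  have := pv_foldl_set_seq d f 1 k b (by omega)
  simpa [Nat.add_comm 1] using this

theorem pv_foldl_set_seq0 {α : Type} (d : α) (f : Nat → α → α) (k : Nat) (b : List α)
    (h : k ≤ b.length) :
    (List.range k).foldl (fun b w => b.set w (f w (b.getD w d))) b
      = (List.range k).map (fun w => f w (b.getD w d)) ++ b.drop k := by
  have := pv_foldl_set_seq d f 0 k b (by omega)
  simpa using this

-- PORT A reaches the canonical bordered shape
theorem pv_A_canon (a : List (List Int)) : soma_mediana a = pvCanon a := by
  simp only [soma_mediana, pvCanon, setCell]
  set m : Nat := ((PySem.List.pyGet? a 0).getD []).length with hm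
  set n : Nat := a.length with hn
  have e1 : ((n:Int)+2-1) = ((n+1:Nat):Int) := by push_cast; ring
  have e1m : ((m:Int)+2-1) = ((m+1:Nat):Int) := by push_cast; ring
  have e2 : ((n:Int)+2) = ((n+2:Nat):Int) := by push_cast; ring
  have e2m : ((m:Int)+2) = ((m+2:Nat):Int) := by push_cast; ring
  rw [e1, e1m, e2, e2m, pv_criaMatriz]
  simp only [PySem.List.pyRange_zero_nat, List.foldl_map,
    Int.toNat_natCast, PySem.List.pyGetD_natCast]
  simp only [← Nat.cast_add_one, Int.toNat_natCast]
  set zrow : List Int := List.replicate (m+2) (0:Int) with hz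
  set brow : List Int := List.replicate (m+2) (6:Int) with hb
  set inner : Nat → List Int := (fun i => (List.range m).map (fun j => (a.getD i []).getD j 0 + 6)) with hinner
  -- one row of the interior loop
  have hrow : ∀ i, (List.range m).foldl (fun r j => r.set (j+1) ((a.getD i []).getD j 0 + 6)) zrow
      = 0 :: inner i ++ [0] := by
    intro i
    rw [pv_foldl_set_seq1 0 (fun j _ => (a.getD i []).getD j 0 + 6) m zrow (by simp [hz])]
    simp [hz, hinner, List.take_replicate, List.drop_replicate]
  -- the interior double loop
  have hint :
      (List.range n).foldl
        (fun x y => (List.range m).foldl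
          (fun x y1 => x.set (y+1) ((x.getD (y+1) []).set (y1+1) ((a.getD y []).getD y1 0 + 6))) x)
        (List.replicate (n+2) zrow)
      = zrow :: (List.range n).map (fun i => 0 :: inner i ++ [0]) ++ [zrow] := by
    rw [pv_foldl_congr_inv (fun b => b.length = n + 2) _
        (fun b i => b.set (i+1) ((List.range m).foldl
          (fun r j => r.set (j+1) ((a.getD i []).getD j 0 + 6)) (b.getD (i+1) [])))
        (List.range n) (List.replicate (n+2) zrow) (by simp)
        (by intro b x hb hx; simpa using hb)
        (by
          intro b x hb hx
          exact pv_foldl_same_row (fun r j => r.set (j+1) ((a.getD x []).getD j 0 + 6)) (x+1)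
            (List.range m) b (by rw [hb]; have := List.mem_range.mp hx; omega))]
    rw [pv_foldl_set_seq1 [] (fun i r => (List.range m).foldl
      (fun r j => r.set (j+1) ((a.getD i []).getD j 0 + 6)) r) n (List.replicate (n+2) zrow) (by simp)]
    have hmap : ∀ w ∈ List.range n,
        (fun w => List.foldl (fun r j => r.set (j + 1) ((a.getD w []).getD j 0 + 6))
          ((List.replicate (n + 2) zrow).getD (w + 1) []) (List.range m)) w
        = (fun i => (0:Int) :: inner i ++ [0]) w := by
      intro w hw
      have hlt : w + 1 < n + 2 := by have := List.mem_range.mp hw; omega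
      simp only [List.getD_replicate _ hlt]
      exact hrow w
    rw [List.map_congr_left hmap]
    simp [List.take_replicate, List.drop_replicate]
  rw [hint]
  set mids := List.map (fun i => (0:Int) :: inner i ++ [0]) (List.range n) with hmids
  have hmidslen : mids.length = n := by simp [hmids]
  -- filling a whole row of length m+2 with 6s
  have hfill : ∀ r : List Int, r.length = m + 2 →
      (List.range (m+2)).foldl (fun r w => r.set w 6) r = brow := by
    intro r hr
    rw [pv_foldl_set_seq0 (0:Int) (fun _ _ => (6:Int)) (m+2) r (by omega)]
    simp [hb, hr]
  -- top border row
  have htop : (List.range (m+2)).foldl (fun x y => x.set 0 ((x.getD 0 []).set y 6))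
      (zrow :: mids ++ [zrow]) = brow :: mids ++ [zrow] := by
    rw [pv_foldl_same_row (fun r w => r.set w 6) 0 (List.range (m+2)) _ (by simp)]
    have h0 : (zrow :: mids ++ [zrow]).getD 0 [] = zrow := rfl
    rw [h0, hfill zrow (by simp [hz])]
    rfl
  rw [htop]
  -- bottom border row
  have hget1 : (brow :: mids ++ [zrow]).getD (n+1) [] = zrow := by
    have h1 : (brow :: mids ++ [zrow]).getD (n+1) [] = (mids ++ [zrow]).getD n [] := rfl
    rw [h1, List.getD_append_right _ _ _ _ (by omega)]
    simp [hmidslen]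
  have hbot : (List.range (m+2)).foldl (fun x y => x.set (n+1) ((x.getD (n+1) []).set y 6))
      (brow :: mids ++ [zrow]) = brow :: mids ++ [brow] := by
    rw [pv_foldl_same_row (fun r w => r.set w 6) (n+1) (List.range (m+2)) _ (by simp [hmidslen])]
    rw [hget1, hfill zrow (by simp [hz])]
    have h2 : (brow :: mids ++ [zrow]).set (n+1) brow = brow :: (mids ++ [zrow]).set n brow := rfl
    rw [h2, List.set_append_right _ _ (by omega)]
    simp [hmidslen]
  rw [hbot]
  -- the two column loops are maps over all rows
  have hcol : ∀ (j : Nat) (M : List (List Int)), M.length = n+2 →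
      (List.range (n+2)).foldl (fun x y => x.set y ((x.getD y []).set j 6)) M
        = M.map (fun r => r.set j 6) := by
    intro j M hM
    rw [pv_foldl_set_seq0 ([]:List Int) (fun _ r => r.set j 6) (n+2) M (by omega)]
    rw [← hM, pv_map_range_getD M [] (fun r => r.set j 6)]
    simp
  rw [hcol 0 _ (by simp [hmidslen]), hcol (m+1) _ (by simp [hmidslen])]
  -- final row shapes
  have hbrow2 : ((brow.set 0 6).set (m+1) 6) = brow := by
    simp [hb, List.set_replicate_self]
  have hg : ∀ i, (((0:Int) :: inner i ++ [0]).set 0 6).set (m+1) 6 = 6 :: inner i ++ [6] := by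
    intro i
    have hli : (inner i).length = m := by simp [hinner]
    have h3 : (((0:Int) :: inner i ++ [0]).set 0 6).set (m+1) 6 = 6 :: (inner i ++ [0]).set m 6 := rfl
    rw [h3, List.set_append_right _ _ (by omega)]
    simp [hli]
  simp only [List.map_map, hmids, List.map_cons, List.map_append]
  rw [hbrow2]
  have hmapg : List.map ((fun r => r.set (m + 1) 6) ∘ (fun r => r.set 0 6) ∘ fun i => (0:Int) :: inner i ++ [0]) (List.range n)
      = List.map (fun row => (6:Int) :: List.map (fun x => row.getD x 0 + 6) (List.range m) ++ [6]) a := by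
    rw [hn, ← pv_map_range_getD a [] (fun row => (6:Int) :: List.map (fun x => row.getD x 0 + 6) (List.range m) ++ [6])]
    apply List.map_congr_left
    intro w hw
    simp only [Function.comp_def, hinner]
    exact hg w
  rw [hmapg]
  simp

-- PORT B reaches the same canonical shape
theorem pv_B_canon (a : List (List Int)) : soma_mediana_alt a = pvCanon a := by
  simp only [soma_mediana_alt, pvCanon]
  set m : Nat := ((PySem.List.pyGet? a 0).getD []).length with hm
  set n : Nat := a.length with hn
  have e2 : ((n:Int)+2) = ((n+2:Nat):Int) := by push_cast; ring
  have e2m : ((m:Int)+2) = ((m+2:Nat):Int) := by push_cast; ring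
  rw [e2, e2m]
  simp only [PySem.List.pyRange_zero_nat, List.map_map, Function.comp_def]
  -- the closed-form row at a border index i (condition false for every j)
  have hborder : ∀ i : Nat, ¬ (0 < (i:Int) ∧ (i:Int) ≤ (n:Int)) →
      (List.range (m+2)).map (fun j : Nat =>
        (if 0 < (i:Int) ∧ (i:Int) ≤ (n:Int) ∧ 0 < (j:Int) ∧ (j:Int) ≤ (m:Int)
         then PySem.List.pyGetD (PySem.List.pyGetD a ((i:Int)-1) []) ((j:Int)-1) 0 else 0) + 6)
      = List.replicate (m+2) (6:Int) := by
    intro i hi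
    have : ∀ j ∈ List.range (m+2),
        (if 0 < (i:Int) ∧ (i:Int) ≤ (n:Int) ∧ 0 < ((j:Nat):Int) ∧ ((j:Nat):Int) ≤ (m:Int)
         then PySem.List.pyGetD (PySem.List.pyGetD a ((i:Int)-1) []) (((j:Nat):Int)-1) 0 else 0) + 6 = (6:Int) := by
      intro j _
      rw [if_neg (by tauto)]
      norm_num
    rw [List.map_congr_left this]
    simp
  -- the closed-form row at an interior index i = k+1, k < n
  have hinterior : ∀ k : Nat, k < n →
      (List.range (m+2)).map (fun j : Nat =>
        (if 0 < ((k+1:Nat):Int) ∧ ((k+1:Nat):Int) ≤ (n:Int) ∧ 0 < (j:Int) ∧ (j:Int) ≤ (m:Int)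
         then PySem.List.pyGetD (PySem.List.pyGetD a (((k+1:Nat):Int)-1) []) ((j:Int)-1) 0 else 0) + 6)
      = 6 :: (List.range m).map (fun j => (a.getD k []).getD j 0 + 6) ++ [6] := by
    intro k hk
    have hik : (((k+1:Nat):Int)-1) = ((k:Nat):Int) := by push_cast; ring
    have hsplit : List.range (m+2) = (0 :: (List.range m).map Nat.succ) ++ [m+1] := by
      rw [List.range_succ, List.range_succ_eq_map]
    rw [hsplit]
    simp only [List.map_append, List.map_cons, List.map_map, List.map_nil, Function.comp_def,
      List.cons_append]
    congr 1
    · rw [if_neg (by simp)]; norm_num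
    congr 1
    · apply List.map_congr_left
      intro t ht
      have htm := List.mem_range.mp ht
      rw [if_pos (by push_cast; omega)]
      rw [hik, PySem.List.pyGetD_natCast]
      have hjt : ((Nat.succ t : Nat):Int) - 1 = ((t:Nat):Int) := by push_cast; ring
      rw [hjt, PySem.List.pyGetD_natCast]
    · rw [if_neg (by push_cast; omega)]; norm_num
  have hsplitn : List.range (n+2) = (0 :: (List.range n).map Nat.succ) ++ [n+1] := by
    rw [List.range_succ, List.range_succ_eq_map]
  rw [hsplitn]
  simp only [List.map_append, List.map_cons, List.map_map, List.map_nil, Function.comp_def,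
    List.cons_append]
  congr 1
  · exact hborder 0 (by simp)
  congr 1
  · rw [hn]
    refine Eq.trans ?_ (pv_map_range_getD a [] _)
    apply List.map_congr_left
    intro k hk
    exact hinterior k (by simpa [hn] using List.mem_range.mp hk)
  · rw [hborder (n+1) (by push_cast; omega)]

-- ===== VERDICT (by name: the statement is the Claim_ definition above) =====
theorem soma_mediana_spec : Claim_equal_soma_mediana := by
  intro a _ _
  unfold Spec_soma_mediana
  rw [pv_A_canon, pv_B_canon]
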